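-- pv_equiv track=rewrite | github.com/Alpha-Dev-0001/Ghost-port-scanner | security_testing_framework.py | _get_protocol_distribution
-- ===== SOURCE A (Python) =====
-- def _get_protocol_distribution(connections):
--     protocols = {"TCP": 0, "UDP": 0, "UNKNOWN": 0}
--     for conn in connections:
--         if conn["status"] == "ESTABLISHED":
--             protocols["TCP"] += 1
--         elif conn["status"] == "NONE":
--             protocols["UDP"] += 1
--         else:
--             protocols["UNKNOWN"] += 1
--     return protocols
-- ===== SOURCE B (Python) =====
-- def _get_protocol_distribution(connections):
--     statuses = [conn["status"] for conn in connections]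
--     tcp = statuses.count("ESTABLISHED")
--     udp = statuses.count("NONE")
--     return {"TCP": tcp, "UDP": udp, "UNKNOWN": len(statuses) - tcp - udp}
-- ===== Notes on version B (the rewrite author's own statement) =====
-- stated objective: alternative
-- what changed: Replaces A's single pass with per-element three-way branching into mutable buckets by staged whole-list passes: extract the statuses once, count the two named statuses with list.count, and derive UNKNOWN arithmetically as len minus the two.
import Mathlib
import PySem

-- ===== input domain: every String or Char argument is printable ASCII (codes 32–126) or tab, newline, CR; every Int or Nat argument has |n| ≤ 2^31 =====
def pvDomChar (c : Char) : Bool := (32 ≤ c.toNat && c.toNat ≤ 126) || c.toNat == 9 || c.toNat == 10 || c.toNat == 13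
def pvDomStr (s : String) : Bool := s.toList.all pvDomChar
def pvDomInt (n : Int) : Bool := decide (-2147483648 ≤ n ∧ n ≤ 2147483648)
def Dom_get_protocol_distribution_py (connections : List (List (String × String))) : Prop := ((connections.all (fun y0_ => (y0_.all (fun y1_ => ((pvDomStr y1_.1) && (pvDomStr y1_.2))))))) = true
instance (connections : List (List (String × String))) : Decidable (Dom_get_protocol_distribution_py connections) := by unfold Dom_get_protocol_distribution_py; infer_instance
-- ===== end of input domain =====

-- B drops A's per-element three-way branching loop: it extracts the statuses once and
-- uses staged whole-list .count passes for the two named statuses, deriving UNKNOWN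
-- arithmetically as len minus the two; same cost, different decomposition. No mutation.

-- ===== PORT A =====
-- conn["status"]: under Pre_ the key is present, so the total getD form is exact.
def get_protocol_distribution_py (connections : List (List (String × String))) : List (String × Int) :=
  let protocols : PySem.Dict String Int := PySem.Dict.mk [("TCP", 0), ("UDP", 0), ("UNKNOWN", 0)]
  (connections.foldl (fun protocols conn =>
      if (PySem.Dict.mk conn).getD "status" "" = "ESTABLISHED" then
        protocols.modify "TCP" 0 (· + 1)
      else if (PySem.Dict.mk conn).getD "status" "" = "NONE" then
        protocols.modify "UDP" 0 (· + 1)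
      else
        protocols.modify "UNKNOWN" 0 (· + 1)) protocols).items

-- ===== PORT B =====
def get_protocol_distribution_py_alt (connections : List (List (String × String))) : List (String × Int) :=
  let statuses := connections.map (fun conn => (PySem.Dict.mk conn).getD "status" "")
  let tcp : Int := PySem.List.count statuses "ESTABLISHED"
  let udp : Int := PySem.List.count statuses "NONE"
  [("TCP", tcp), ("UDP", udp), ("UNKNOWN", (statuses.length : Int) - tcp - udp)]

-- ===== PRECONDITION & SPEC =====
-- Pre_ excludes exactly the connections lacking a "status" key, on which both A and B raise KeyError.
def Pre_get_protocol_distribution_py (connections : List (List (String × String))) : Prop :=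
  ∀ conn ∈ connections, (PySem.Dict.mk conn).contains "status" = true
instance (connections : List (List (String × String))) : Decidable (Pre_get_protocol_distribution_py connections) := by unfold Pre_get_protocol_distribution_py; infer_instance

def pvWitness_get_protocol_distribution_py : (List (List (String × String))) :=
  [[("status", "ESTABLISHED")], [("status", "LISTEN")]]

def Spec_get_protocol_distribution_py (connections : List (List (String × String))) (out : List (String × Int)) : Prop := out = get_protocol_distribution_py_alt connections
instance (connections : List (List (String × String))) (out : List (String × Int)) : Decidable (Spec_get_protocol_distribution_py connections out) := by unfold Spec_get_protocol_distribution_py; infer_instance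

-- ===== CLAIM (what is proved, stated in full; the proofs are below) =====
def Claim_equal_get_protocol_distribution_py : Prop := ∀ (connections : List (List (String × String))), Dom_get_protocol_distribution_py connections → Pre_get_protocol_distribution_py connections → Spec_get_protocol_distribution_py connections (get_protocol_distribution_py connections)

-- ===== LEMMAS AND PROOFS =====

def pvCntE (l : List String) : Nat := l.count "ESTABLISHED"
def pvCntN (l : List String) : Nat := l.count "NONE"
def pvCntO (l : List String) : Nat := l.countP (fun s => !(s == "ESTABLISHED") && !(s == "NONE"))

lemma pvCnt_sum (l : List String) : pvCntE l + pvCntN l + pvCntO l = l.length := by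
  induction l with
  | nil => rfl
  | cons s t ih =>
    by_cases h1 : s = "ESTABLISHED" <;> by_cases h2 : s = "NONE" <;>
      simp [pvCntE, pvCntN, pvCntO, h1, h2] at * <;> omega

lemma pvFoldA (l : List String) (a b c : Int) :
    l.foldl (fun (protocols : PySem.Dict String Int) s =>
        if s = "ESTABLISHED" then protocols.modify "TCP" 0 (· + 1)
        else if s = "NONE" then protocols.modify "UDP" 0 (· + 1)
        else protocols.modify "UNKNOWN" 0 (· + 1))
      (PySem.Dict.mk [("TCP", a), ("UDP", b), ("UNKNOWN", c)]) =
    PySem.Dict.mk [("TCP", a + pvCntE l), ("UDP", b + pvCntN l), ("UNKNOWN", c + pvCntO l)] := by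
  induction l generalizing a b c with
  | nil => simp [pvCntE, pvCntN, pvCntO]
  | cons s t ih =>
    by_cases h1 : s = "ESTABLISHED"
    · simp only [List.foldl_cons, if_pos h1]
      have hm : (PySem.Dict.mk [("TCP", a), ("UDP", b), ("UNKNOWN", c)]).modify "TCP" 0 (· + 1) =
          PySem.Dict.mk [("TCP", a + 1), ("UDP", b), ("UNKNOWN", c)] := by
        simp [PySem.Dict.modify, PySem.Dict.getD, PySem.Dict.get?, PySem.Dict.insert, PySem.Dict.contains]
      rw [hm, ih]
      simp [pvCntE, pvCntN, pvCntO, h1]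
      omega
    · by_cases h2 : s = "NONE"
      · simp only [List.foldl_cons, if_neg h1, if_pos h2]
        have hm : (PySem.Dict.mk [("TCP", a), ("UDP", b), ("UNKNOWN", c)]).modify "UDP" 0 (· + 1) =
            PySem.Dict.mk [("TCP", a), ("UDP", b + 1), ("UNKNOWN", c)] := by
          simp [PySem.Dict.modify, PySem.Dict.getD, PySem.Dict.get?, PySem.Dict.insert, PySem.Dict.contains]
        rw [hm, ih]
        simp [pvCntE, pvCntN, pvCntO, h2]
        omega
      · simp only [List.foldl_cons, if_neg h1, if_neg h2]
        have hm : (PySem.Dict.mk [("TCP", a), ("UDP", b), ("UNKNOWN", c)]).modify "UNKNOWN" 0 (· + 1) =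
            PySem.Dict.mk [("TCP", a), ("UDP", b), ("UNKNOWN", c + 1)] := by
          simp [PySem.Dict.modify, PySem.Dict.getD, PySem.Dict.get?, PySem.Dict.insert, PySem.Dict.contains]
        rw [hm, ih]
        simp [pvCntE, pvCntN, pvCntO, h1, h2]
        omega

-- ===== VERDICT (by name: the statement is the Claim_ definition above) =====
theorem get_protocol_distribution_py_spec : Claim_equal_get_protocol_distribution_py := by
  intro connections _ _
  unfold Spec_get_protocol_distribution_py
  unfold get_protocol_distribution_py get_protocol_distribution_py_alt
  dsimp only
  have hA := pvFoldA (connections.map (fun conn => (PySem.Dict.mk conn).getD "status" "")) 0 0 0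
  rw [List.foldl_map] at hA
  rw [hA]
  have hs := pvCnt_sum (connections.map (fun conn => (PySem.Dict.mk conn).getD "status" ""))
  simp only [PySem.List.count_eq, List.length_map] at *
  simp only [pvCntE, pvCntN, pvCntO] at *
  simp only [List.countP_map] at *
  simp
  omega
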